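-- pv_equiv track=rewrite | github.com/keithrozario/advent-of-code | 20/solution.py | check_wall_on_path
-- ===== SOURCE A (Python) =====
-- DIRECTIONS = [(0, 1, 'E'), (1, 0, 'S'), (0, -1, 'W'), (-1, 0, 'N')]
--
-- def check_wall_on_path(wall: list[int,int], path: list[tuple[int,int]])->bool:
--
--     if wall[0]==0 or wall[1]==0:
--         return False
--     else:
--         y,x = wall
--         for dx, dy, _ in DIRECTIONS:
--             nx, ny = x + dx, y + dy
--             if (ny,nx) in path:
--                 return True
--
--     return False
-- ===== SOURCE B (Python) =====
-- def check_wall_on_path(wall: list, path: list) -> bool: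
--     if wall[0] == 0 or wall[1] == 0:
--         return False
--     y, x = wall
--     for py, px in path:
--         if abs(py - y) + abs(px - x) == 1:
--             return True
--     return False
-- ===== Notes on version B (the rewrite author's own statement) =====
-- stated objective: alternative
-- what changed: Instead of generating the four neighbor cells and membership-testing each against the path, B scans the path once and returns True on the first cell at Manhattan distance 1 from the wall.
import Mathlib
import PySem

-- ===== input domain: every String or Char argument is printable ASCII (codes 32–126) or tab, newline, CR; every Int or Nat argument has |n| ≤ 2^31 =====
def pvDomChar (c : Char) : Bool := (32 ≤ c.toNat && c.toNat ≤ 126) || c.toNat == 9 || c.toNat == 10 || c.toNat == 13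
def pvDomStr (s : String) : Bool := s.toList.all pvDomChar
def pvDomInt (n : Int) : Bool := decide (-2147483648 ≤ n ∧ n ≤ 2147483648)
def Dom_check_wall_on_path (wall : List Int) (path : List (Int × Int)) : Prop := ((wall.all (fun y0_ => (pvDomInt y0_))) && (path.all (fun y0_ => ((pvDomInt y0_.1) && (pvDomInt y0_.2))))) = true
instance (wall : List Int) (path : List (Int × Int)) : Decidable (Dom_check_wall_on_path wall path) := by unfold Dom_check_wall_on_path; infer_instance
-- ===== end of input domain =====

-- B replaces A's "generate the four neighbor cells and membership-test each against the
-- path" with a single scan of the path looking for a cell at Manhattan distance 1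
-- (alternative decomposition, same cost); return values agree wherever A returns.

-- ===== PORT A =====
-- A's module constant DIRECTIONS = [(0,1,'E'),(1,0,'S'),(0,-1,'W'),(-1,0,'N')]
def pvDirections : List (Int × Int × Char) := [(0, 1, 'E'), (1, 0, 'S'), (0, -1, 'W'), (-1, 0, 'N')]

-- the `for dx, dy, _ in DIRECTIONS` loop with early `return True`
def pvLoopA (y x : Int) (path : List (Int × Int)) : List (Int × Int × Char) → Bool
  | [] => false
  | (dx, dy, _) :: rest =>
      -- nx, ny = x + dx, y + dy ; if (ny, nx) in path: return True
      if path.contains (y + dy, x + dx) then true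
      else pvLoopA y x path rest

def check_wall_on_path (wall : List Int) (path : List (Int × Int)) : Bool :=
  -- wall[0] / wall[1] succeed on Pre_; getD stands in for the (excluded) IndexError case
  if wall.getD 0 0 == 0 || wall.getD 1 0 == 0 then false
  else
    -- y, x = wall  (succeeds exactly when wall has two elements; guaranteed by Pre_)
    let y := wall.getD 0 0
    let x := wall.getD 1 0
    pvLoopA y x path pvDirections

-- ===== PORT B =====
-- the `for py, px in path` loop with early `return True`
def pvLoopB (y x : Int) : List (Int × Int) → Bool
  | [] => false
  | (py, px) :: rest =>
      if (py - y).natAbs + (px - x).natAbs == 1 then true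
      else pvLoopB y x rest

def check_wall_on_path_alt (wall : List Int) (path : List (Int × Int)) : Bool :=
  if wall.getD 0 0 == 0 || wall.getD 1 0 == 0 then false
  else
    let y := wall.getD 0 0
    let x := wall.getD 1 0
    pvLoopB y x path

-- ===== PRECONDITION & SPEC =====
-- Pre_ is exactly the set of inputs where the Python A returns: wall of length 2, or a
-- longer/shorter wall whose first (resp. second) entry is 0 so A short-circuits to False
-- before the unpacking `y, x = wall` (otherwise A raises IndexError/ValueError).
def Pre_check_wall_on_path (wall : List Int) (path : List (Int × Int)) : Prop :=
  wall.length = 2 ∨ (1 ≤ wall.length ∧ wall.getD 0 0 = 0) ∨ (2 ≤ wall.length ∧ wall.getD 1 0 = 0)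
instance (wall : List Int) (path : List (Int × Int)) : Decidable (Pre_check_wall_on_path wall path) := by unfold Pre_check_wall_on_path; infer_instance

def pvWitness_check_wall_on_path : List Int × (List (Int × Int)) := ([2, 3], [(2, 4), (5, 5)])

def Spec_check_wall_on_path (wall : List Int) (path : List (Int × Int)) (out : Bool) : Prop := out = check_wall_on_path_alt wall path
instance (wall : List Int) (path : List (Int × Int)) (out : Bool) : Decidable (Spec_check_wall_on_path wall path out) := by unfold Spec_check_wall_on_path; infer_instance

-- ===== CLAIM (what is proved, stated in full; the proofs are below) =====
def Claim_equal_check_wall_on_path : Prop := ∀ (wall : List Int) (path : List (Int × Int)), Dom_check_wall_on_path wall path → Pre_check_wall_on_path wall path → Spec_check_wall_on_path wall path (check_wall_on_path wall path)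

-- ===== LEMMAS AND PROOFS =====

-- A's loop over the four directions tests exactly the four orthogonal neighbors;
-- B's scan finds a path cell at Manhattan distance 1.  Same answer.
theorem pvLoops_eq (y x : Int) (path : List (Int × Int)) :
    pvLoopA y x path pvDirections = pvLoopB y x path := by
  rw [Bool.eq_iff_iff]
  constructor
  · intro h
    -- extract: one of the four neighbors is in path
    have hmem : (y, x + 1) ∈ path ∨ (y + 1, x) ∈ path ∨ (y, x - 1) ∈ path ∨ (y - 1, x) ∈ path := by
      simp [pvDirections, pvLoopA, show y + -1 = y - 1 from by ring,
            show x + -1 = x - 1 from by ring] at h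
      tauto
    -- membership of a distance-1 cell makes pvLoopB true
    clear h
    induction path with
    | nil => simp at hmem
    | cons p t ih =>
      obtain ⟨py, px⟩ := p
      by_cases hd : (py - y).natAbs + (px - x).natAbs = 1
      · simp [pvLoopB, hd]
      · have : (y, x + 1) ∈ t ∨ (y + 1, x) ∈ t ∨ (y, x - 1) ∈ t ∨ (y - 1, x) ∈ t := by
          rcases hmem with h | h | h | h <;> rcases List.mem_cons.mp h with he | ht
          · exfalso; rw [Prod.mk.injEq] at he; omega
          · exact Or.inl ht
          · exfalso; rw [Prod.mk.injEq] at he; omega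
          · exact Or.inr (Or.inl ht)
          · exfalso; rw [Prod.mk.injEq] at he; omega
          · exact Or.inr (Or.inr (Or.inl ht))
          · exfalso; rw [Prod.mk.injEq] at he; omega
          · exact Or.inr (Or.inr (Or.inr ht))
        have := ih this
        simp [pvLoopB, hd, this]
  · intro h
    -- find the distance-1 cell in path, then decide which neighbor it is
    have : ∃ p ∈ path, (p.1 - y).natAbs + (p.2 - x).natAbs = 1 := by
      induction path with
      | nil => simp [pvLoopB] at h
      | cons p t ih =>
        obtain ⟨py, px⟩ := p
        by_cases hd : (py - y).natAbs + (px - x).natAbs = 1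
        · exact ⟨(py, px), List.mem_cons_self, hd⟩
        · have hb : pvLoopB y x t = true := by simpa [pvLoopB, hd] using h
          obtain ⟨q, hq, hq1⟩ := ih hb
          exact ⟨q, List.mem_cons_of_mem _ hq, hq1⟩
    obtain ⟨⟨py, px⟩, hmem, hd⟩ := this
    have hcases : (py = y ∧ px = x + 1) ∨ (py = y + 1 ∧ px = x) ∨ (py = y ∧ px = x - 1) ∨ (py = y - 1 ∧ px = x) := by
      simp at hd; omega
    rcases hcases with ⟨hy, hx⟩ | ⟨hy, hx⟩ | ⟨hy, hx⟩ | ⟨hy, hx⟩ <;> subst hy <;> subst hx <;>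
      simp [pvDirections, pvLoopA] at hmem ⊢ <;> tauto

-- ===== VERDICT (by name: the statement is the Claim_ definition above) =====
theorem check_wall_on_path_spec : Claim_equal_check_wall_on_path := by
  intro wall path _ _
  unfold Spec_check_wall_on_path check_wall_on_path check_wall_on_path_alt
  split
  · rfl
  · exact pvLoops_eq _ _ _
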